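-- pv_equiv track=rewrite | github.com/Duekvu/Sudoku-Solver | sudoku.py | getDegree
-- ===== SOURCE A (Python) =====
-- import math
--
-- def getDegree(board, row, col, values):
--
--     # check Column:
--     degree = 0
--     for i in range (len(board)):
--         for val in values[col+row*9]:
--             if val == board[row][i]:
--                 degree+=1
--
--             if val == board[i][col]:
--                 degree+=1
--
--
--     # Check sub-boards
--     curr_row = math.floor (row / 3)
--     curr_col = math.floor (col / 3)
--
--     curr_row *= 3
--     curr_col *= 3
--
--     for i in range (3):
--         for j in range (3):
--             for val in values[col+row*9]:
--                 if val == board[i+curr_row][j+curr_col]: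
--                     degree+=1
--
--     return degree
-- ===== SOURCE B (Python) =====
-- import math
--
-- def getDegree(board, row, col, values):
--     # Gather every cell A scans (row cell and column cell per i, then the 3x3 box),
--     # tabulate them once in a dict, then look up each candidate value.
--     vals = values[col + row * 9]
--     if not vals:
--         return 0  # no candidate values: nothing to count
--     cells = []
--     for i in range(len(board)):
--         cells.append(board[row][i])
--         cells.append(board[i][col])
--     r0 = math.floor(row / 3) * 3
--     c0 = math.floor(col / 3) * 3
--     for i in range(3):
--         for j in range(3):
--             cells.append(board[i + r0][j + c0])
--     counts = {}
--     for c in cells: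
--         counts[c] = counts.get(c, 0) + 1
--     return sum(counts.get(v, 0) for v in vals)
-- ===== Notes on version B (the rewrite author's own statement) =====
-- stated objective: alternative
-- what changed: B collects the scanned row/column/box cells into one list, tabulates their multiplicities in a dict in a single pass, and returns the sum of the looked-up counts per candidate value, instead of A's rescan of every cell once per candidate.
import Mathlib
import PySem

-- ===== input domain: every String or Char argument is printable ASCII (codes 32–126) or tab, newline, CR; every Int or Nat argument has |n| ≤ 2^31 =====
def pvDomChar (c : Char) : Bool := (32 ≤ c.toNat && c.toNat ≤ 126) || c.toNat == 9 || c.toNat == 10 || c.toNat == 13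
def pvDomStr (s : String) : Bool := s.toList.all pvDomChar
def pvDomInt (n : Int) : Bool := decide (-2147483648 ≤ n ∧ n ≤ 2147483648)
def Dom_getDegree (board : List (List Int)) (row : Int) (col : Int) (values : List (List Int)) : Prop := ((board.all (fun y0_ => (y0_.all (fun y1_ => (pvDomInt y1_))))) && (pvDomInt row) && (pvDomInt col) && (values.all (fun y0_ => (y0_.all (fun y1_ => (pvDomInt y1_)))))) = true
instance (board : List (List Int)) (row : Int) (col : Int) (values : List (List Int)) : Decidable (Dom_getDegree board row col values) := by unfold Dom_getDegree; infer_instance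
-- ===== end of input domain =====

-- B tabulates all scanned cells once in a dict and looks up each candidate value, instead of rescanning the cells per candidate; same return value as A wherever A returns.

-- shared indexing helper: board[r][c] (total form; Pre_ guarantees the accesses are in range)
def pvCell (board : List (List Int)) (r c : Int) : Int :=
  (PySem.List.pyGet? ((PySem.List.pyGet? board r).getD []) c).getD 0

-- ===== PORT A =====
-- math.floor(row / 3) equals floor division exactly for |row| ≤ 2^31 (the Dom bound); ported as PySem.Int.floordiv.
-- The two sequential "if … degree += 1" of the inner loop are written as the second if applied to the result of the first.
def getDegree (board : List (List Int)) (row : Int) (col : Int) (values : List (List Int)) : Int :=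
  let vs := (PySem.List.pyGet? values (col + row * 9)).getD []
  let degree : Int := (List.range board.length).foldl (fun (d : Int) (i : ℕ) =>
      vs.foldl (fun d val =>
        if val = pvCell board (i : Int) col then (if val = pvCell board row (i : Int) then d + 1 else d) + 1
        else (if val = pvCell board row (i : Int) then d + 1 else d)) d) 0
  let currRow := PySem.Int.floordiv row 3 * 3
  let currCol := PySem.Int.floordiv col 3 * 3
  (List.range 3).foldl (fun (d : Int) (i : ℕ) =>
    (List.range 3).foldl (fun (d : Int) (j : ℕ) =>
      vs.foldl (fun d val =>
        if val = pvCell board ((i : Int) + currRow) ((j : Int) + currCol) then d + 1 else d) d) d) degree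

-- ===== PORT B =====
def getDegree_alt (board : List (List Int)) (row : Int) (col : Int) (values : List (List Int)) : Int :=
  let vs := (PySem.List.pyGet? values (col + row * 9)).getD []
  if vs = [] then 0
  else
    let cells := (List.range board.length).foldl (fun (cs : List Int) (i : ℕ) =>
        (cs ++ [pvCell board row (i : Int)]) ++ [pvCell board (i : Int) col]) []
    let r0 := PySem.Int.floordiv row 3 * 3
    let c0 := PySem.Int.floordiv col 3 * 3
    let cells := (List.range 3).foldl (fun (cs : List Int) (i : ℕ) =>
        (List.range 3).foldl (fun (cs : List Int) (j : ℕ) =>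
          cs ++ [pvCell board ((i : Int) + r0) ((j : Int) + c0)]) cs) cells
    let counts := cells.foldl (fun (d : PySem.Dict Int Int) c => d.insert c (d.getD c 0 + 1)) PySem.Dict.empty
    vs.foldl (fun s v => s + counts.getD v 0) 0

-- ===== PRECONDITION & SPEC =====
-- Pre_ = exactly the inputs on which the Python A returns (no IndexError): values[col+row*9]
-- exists, and if that candidate list is nonempty every board access of the scan is in range.
def Pre_getDegree (board : List (List Int)) (row : Int) (col : Int) (values : List (List Int)) : Prop :=
  PySem.List.pyGet? values (col + row * 9) ≠ none ∧
  ((PySem.List.pyGet? values (col + row * 9)).getD [] ≠ [] →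
    (board ≠ [] →
      PySem.Raise.InRange board.length row ∧
      board.length ≤ ((PySem.List.pyGet? board row).getD []).length ∧
      (∀ r ∈ board, PySem.Raise.InRange r.length col)) ∧
    (∀ i ∈ List.range 3,
      PySem.Raise.InRange board.length ((i : Int) + PySem.Int.floordiv row 3 * 3) ∧
      ∀ j ∈ List.range 3,
        PySem.Raise.InRange
          ((PySem.List.pyGet? board ((i : Int) + PySem.Int.floordiv row 3 * 3)).getD []).length
          ((j : Int) + PySem.Int.floordiv col 3 * 3)))
instance (board : List (List Int)) (row : Int) (col : Int) (values : List (List Int)) : Decidable (Pre_getDegree board row col values) := by unfold Pre_getDegree; infer_instance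

def pvWitness_getDegree : List (List Int) × Int × Int × List (List Int) :=
  ([[1,2,3],[4,5,6],[7,8,9]], 0, 0, [[1]])

def Spec_getDegree (board : List (List Int)) (row : Int) (col : Int) (values : List (List Int)) (out : Int) : Prop := out = getDegree_alt board row col values
instance (board : List (List Int)) (row : Int) (col : Int) (values : List (List Int)) (out : Int) : Decidable (Spec_getDegree board row col values out) := by unfold Spec_getDegree; infer_instance

-- ===== CLAIM (what is proved, stated in full; the proofs are below) =====
def Claim_equal_getDegree : Prop := ∀ (board : List (List Int)) (row : Int) (col : Int) (values : List (List Int)), Dom_getDegree board row col values → Pre_getDegree board row col values → Spec_getDegree board row col values (getDegree board row col values)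

-- ===== LEMMAS AND PROOFS =====

-- cnt vs c = how many elements of vs equal c
def cnt : List Int → Int → Int
  | [], _ => 0
  | v :: t, c => (if v = c then 1 else 0) + cnt t c

theorem cnt_shift (c : Int) : ∀ (t : List Int) (d : Int),
    t.foldl (fun d v => if v = c then d + 1 else d) d = d + cnt t c := by
  intro t
  induction t with
  | nil => intro d; simp [cnt]
  | cons a t ih =>
    intro d
    simp only [List.foldl_cons, cnt]
    rw [ih]
    split_ifs <;> ring

theorem cnt_two_shift (c1 c2 : Int) : ∀ (t : List Int) (d : Int),
    t.foldl (fun d val =>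
      if val = c2 then (if val = c1 then d + 1 else d) + 1
      else (if val = c1 then d + 1 else d)) d = d + cnt t c1 + cnt t c2 := by
  intro t
  induction t with
  | nil => intro d; simp [cnt]
  | cons a t ih =>
    intro d
    simp only [List.foldl_cons, cnt]
    rw [ih]
    split_ifs <;> ring

-- sumCnt vs cells = Σ_{c ∈ cells} cnt vs c
def sumCnt (vs : List Int) : List Int → Int
  | [] => 0
  | c :: cs => cnt vs c + sumCnt vs cs


theorem sumCnt_append (vs : List Int) : ∀ xs ys : List Int,
    sumCnt vs (xs ++ ys) = sumCnt vs xs + sumCnt vs ys := by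
  intro xs ys
  induction xs with
  | nil => simp [sumCnt]
  | cons a t ih =>
    simp only [List.cons_append, sumCnt]
    rw [ih]
    ring

theorem sumCnt_singleton (vs : List Int) (c : Int) :
    sumCnt vs [c] = cnt vs c := by
  simp [sumCnt]




theorem foldl_add_split (f g : Int → Int) : ∀ (vs : List Int) (s t : Int),
    vs.foldl (fun s v => s + (f v + g v)) (s + t)
      = vs.foldl (fun s v => s + f v) s + vs.foldl (fun s v => s + g v) t := by
  intro vs
  induction vs with
  | nil => intro s t; simp
  | cons a w ih =>
    intro s t
    simp only [List.foldl_cons]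
    have h : s + t + (f a + g a) = (s + f a) + (t + g a) := by ring
    rw [h, ih]

theorem foldl_indicator (a : Int) : ∀ (vs : List Int) (s : Int),
    vs.foldl (fun s v => s + (if a = v then (1:Int) else 0)) s = s + cnt vs a := by
  intro vs
  induction vs with
  | nil => intro s; simp [cnt]
  | cons v0 t ih =>
    intro s
    simp only [List.foldl_cons, cnt]
    rw [ih]
    rcases eq_or_ne a v0 with h | h
    · subst h; simp; ring
    · simp [h, Ne.symm h]

-- the column part of A equals Σ cnt over the cells B collects for the columns
theorem colA (board : List (List Int)) (row col : Int) (vs : List Int) : ∀ (n : ℕ) (d : Int),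
    (List.range n).foldl (fun (d : Int) (i : ℕ) =>
      vs.foldl (fun d val =>
        if val = pvCell board (i : Int) col then (if val = pvCell board row (i : Int) then d + 1 else d) + 1
        else (if val = pvCell board row (i : Int) then d + 1 else d)) d) d
    = d + sumCnt vs ((List.range n).foldl (fun (cs : List Int) (i : ℕ) =>
        (cs ++ [pvCell board row (i : Int)]) ++ [pvCell board (i : Int) col]) []) := by
  intro n
  induction n with
  | zero => intro d; simp [sumCnt]
  | succ n ih =>
    intro d
    rw [List.range_succ, List.foldl_append, List.foldl_append, ih]
    simp only [List.foldl_cons, List.foldl_nil]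
    rw [cnt_two_shift, sumCnt_append, sumCnt_append, sumCnt_singleton, sumCnt_singleton]
    ring

-- the dict B builds is a counter of its cells list
theorem counterD (v : Int) : ∀ (cells : List Int) (d0 : PySem.Dict Int Int),
    (cells.foldl (fun d c => d.insert c (d.getD c 0 + 1)) d0).getD v 0
      = d0.getD v 0 + cnt cells v := by
  intro cells
  induction cells with
  | nil => intro d0; simp [cnt]
  | cons a t ih =>
    intro d0
    simp only [List.foldl_cons, cnt]
    rw [ih, PySem.Dict.getD_insert]
    rcases eq_or_ne v a with h | h
    · subst h; simp; ring
    · simp [h, Ne.symm h]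

-- Fubini: summing counts over candidates = summing counts over cells
theorem swapSum (vs : List Int) : ∀ cells : List Int,
    vs.foldl (fun s v => s + cnt cells v) 0 = sumCnt vs cells := by
  intro cells
  induction cells with
  | nil =>
    simp [cnt, sumCnt]
  | cons a t ih =>
    simp only [cnt]
    calc vs.foldl (fun s v => s + ((if a = v then (1:Int) else 0) + cnt t v)) 0
        = vs.foldl (fun s v => s + ((if a = v then (1:Int) else 0) + cnt t v)) (0 + 0) := by
          rw [zero_add]
      _ = vs.foldl (fun s v => s + (if a = v then (1:Int) else 0)) 0
            + vs.foldl (fun s v => s + cnt t v) 0 :=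
          foldl_add_split (fun v => if a = v then (1:Int) else 0) (fun v => cnt t v) vs 0 0
      _ = sumCnt vs (a :: t) := by rw [ih, foldl_indicator]; simp [sumCnt]

theorem ports_eq (board : List (List Int)) (row col : Int) (values : List (List Int)) :
    getDegree board row col values = getDegree_alt board row col values := by
  by_cases hvs : (PySem.List.pyGet? values (col + row * 9)).getD [] = []
  · simp [getDegree, getDegree_alt, hvs]
  · have h3 : List.range 3 = [0, 1, 2] := by decide
    simp only [getDegree, getDegree_alt, if_neg hvs]
    rw [colA]
    simp only [h3, List.foldl_cons, List.foldl_nil]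
    simp only [cnt_shift, counterD, PySem.Dict.getD_empty, zero_add]
    rw [swapSum]
    simp only [sumCnt_append, sumCnt_singleton]

-- ===== VERDICT (by name: the statement is the Claim_ definition above) =====
theorem getDegree_spec : Claim_equal_getDegree := by
  intro board row col values _ _
  unfold Spec_getDegree
  exact ports_eq board row col values
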